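-- pv_equiv track=rewrite | github.com/runningfire/HE-s-BACK | for_generator_of_Rhymes/ttest.py | get_space_indices
-- ===== SOURCE A (Python) =====
-- def get_space_indices(string: str) -> list:
--     """
--     Возвращает список индексов пробелов в строке исключая первый и последний символы.
--
--     Параметры:
--     - string: строка
--
--     Возвращает:
--     - list_space: список кортежей с индексами пробелов
--     """
--
--     space_indices = [0]  # добавляем первый индекс, равный 0
--     for i, char in enumerate(string):
--         if char == " ":
--             space_indices.append(i)
--     space_indices.append(len(string))  # добавляем последний индекс
--     list_space = [
--         (space_indices[i], space_indices[i + 1])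
--         for i in range(len(space_indices) - 1)
--     ]
--     return list_space
-- ===== SOURCE B (Python) =====
-- def get_space_indices(string: str) -> list:
--     # Single pass: thread the previous boundary through the scan instead of
--     # materializing the boundary-index list and pairing it afterwards.
--     prev = 0
--     result = []
--     for i, char in enumerate(string):
--         if char == " ":
--             result.append((prev, i))
--             prev = i
--     result.append((prev, len(string)))
--     return result
-- ===== Notes on version B (the rewrite author's own statement) =====
-- stated objective: simpler
-- what changed: B fuses the two phases into one pass: instead of building the full boundary-index list and then pairing consecutive entries with an indexed comprehension, it threads the previous boundary through a single scan and emits each pair on the spot.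
import Mathlib
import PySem

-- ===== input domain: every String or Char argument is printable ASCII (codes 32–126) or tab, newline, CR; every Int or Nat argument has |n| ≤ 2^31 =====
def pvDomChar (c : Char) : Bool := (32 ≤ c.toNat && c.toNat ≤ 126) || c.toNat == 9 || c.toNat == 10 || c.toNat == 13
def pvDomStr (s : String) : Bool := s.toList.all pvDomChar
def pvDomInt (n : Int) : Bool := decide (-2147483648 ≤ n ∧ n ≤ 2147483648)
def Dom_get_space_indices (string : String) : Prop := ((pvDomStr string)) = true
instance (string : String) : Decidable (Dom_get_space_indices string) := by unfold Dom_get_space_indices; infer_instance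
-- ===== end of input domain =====

-- B fuses A's two phases (collect boundary indices, then pair consecutive ones)
-- into a single scan that threads the previous boundary; same return value.

-- ===== PORT A =====
def get_space_indices (string : String) : List (Int × Int) :=
  let cs := string.toList
  let space_indices :=
    (PySem.List.enumerate cs 0).foldl
      (fun acc p => if p.2 = ' ' then acc ++ [p.1] else acc) [(0 : Int)]
  let space_indices := space_indices ++ [(cs.length : Int)]
  -- space_indices[i] / [i+1]: indices produced by the range are always in bounds,
  -- so pyGetD is exact here (Python never raises on these accesses)
  (PySem.List.pyRange 0 ((space_indices.length : Int) - 1) 1).foldl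
    (fun acc i =>
      acc ++ [(PySem.List.pyGetD space_indices i 0, PySem.List.pyGetD space_indices (i + 1) 0)]) []

-- ===== PORT B =====
def get_space_indices_alt (string : String) : List (Int × Int) :=
  let cs := string.toList
  let st :=
    (PySem.List.enumerate cs 0).foldl
      (fun (st : Int × List (Int × Int)) p =>
        if p.2 = ' ' then (p.1, st.2 ++ [(st.1, p.1)]) else st)
      ((0 : Int), ([] : List (Int × Int)))
  st.2 ++ [(st.1, (cs.length : Int))]

-- ===== PRECONDITION & SPEC =====
def Spec_get_space_indices (string : String) (out : List (Int × Int)) : Prop := out = get_space_indices_alt string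
instance (string : String) (out : List (Int × Int)) : Decidable (Spec_get_space_indices string out) := by unfold Spec_get_space_indices; infer_instance

-- ===== CLAIM (what is proved, stated in full; the proofs are below) =====
def Claim_equal_get_space_indices : Prop := ∀ (string : String), Dom_get_space_indices string → Spec_get_space_indices string (get_space_indices string)

-- ===== LEMMAS AND PROOFS =====

/-- The space indices of `cs`, positions counted from `k`. -/
def pvSpaces : List Char → Int → List Int
  | [], _ => []
  | c :: cs, k => if c = ' ' then k :: pvSpaces cs (k + 1) else pvSpaces cs (k + 1)

/-- Consecutive pairs `prev,l,n` seen as boundaries. -/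
def pvPairs : Int → List Int → Int → List (Int × Int)
  | prev, [], n => [(prev, n)]
  | prev, x :: xs, n => (prev, x) :: pvPairs x xs n

lemma pvA_fold (cs : List Char) (k : Int) (acc : List Int) :
    (PySem.List.enumerate cs k).foldl
      (fun acc p => if p.2 = ' ' then acc ++ [p.1] else acc) acc
    = acc ++ pvSpaces cs k := by
  induction cs generalizing k acc with
  | nil => simp [pvSpaces, PySem.List.enumerate_nil]
  | cons c cs ih =>
    simp only [PySem.List.enumerate_cons, List.foldl_cons, pvSpaces]
    split <;> simp [ih]

lemma pvB_fold (cs : List Char) (k prev : Int) (acc : List (Int × Int)) (n : Int) :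
    ((PySem.List.enumerate cs k).foldl
        (fun (st : Int × List (Int × Int)) p =>
          if p.2 = ' ' then (p.1, st.2 ++ [(st.1, p.1)]) else st) (prev, acc)).2 ++
      [(((PySem.List.enumerate cs k).foldl
        (fun (st : Int × List (Int × Int)) p =>
          if p.2 = ' ' then (p.1, st.2 ++ [(st.1, p.1)]) else st) (prev, acc)).1, n)]
    = acc ++ pvPairs prev (pvSpaces cs k) n := by
  induction cs generalizing k prev acc with
  | nil => simp [pvSpaces, pvPairs, PySem.List.enumerate_nil]
  | cons c cs ih =>
    simp only [PySem.List.enumerate_cons, List.foldl_cons, pvSpaces]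
    split <;> simp [ih, pvPairs]

lemma pvZip_pairs (l : List Int) (prev n : Int) :
    (prev :: (l ++ [n])).zip (l ++ [n]) = pvPairs prev l n := by
  induction l generalizing prev with
  | nil => simp [pvPairs]
  | cons x xs ih =>
    simp only [pvPairs, List.cons_append, List.zip_cons_cons]
    exact congrArg _ (ih x)

lemma pvRange_zip (L : List Int) (hL : L ≠ []) :
    (PySem.List.pyRange 0 ((L.length : Int) - 1) 1).map
      (fun i => (PySem.List.pyGetD L i 0, PySem.List.pyGetD L (i + 1) 0))
    = L.zip L.tail := by
  apply List.ext_getElem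
  · have h1 : 1 ≤ L.length := List.length_pos_iff.mpr hL
    simp [PySem.List.length_pyRange_one, List.length_zip, List.length_tail]
  · intro k h1 h2
    have hlen : (PySem.List.pyRange 0 ((L.length : Int) - 1) 1).length = L.length - 1 := by
      simp [PySem.List.length_pyRange_one]
    rw [List.length_map, hlen] at h1
    have hk1 : k + 1 < L.length := by omega
    have hk : k < L.length := by omega
    rw [List.getElem_map, PySem.List.getElem_pyRange_one]
    have e1 : ((0 : Int) + (k : Int)) = ((k : Nat) : Int) := by omega
    have e2 : ((k : Int) + 1) = (((k + 1 : Nat)) : Int) := by omega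
    rw [e1]
    rw [e2, PySem.List.pyGetD_natCast, PySem.List.pyGetD_natCast]
    rw [List.getElem_zip]
    simp [List.getD_eq_getElem?_getD, List.getElem?_eq_getElem hk,
      List.getElem?_eq_getElem hk1, List.getElem_tail]

lemma pvA_eq (s : String) :
    get_space_indices s = pvPairs 0 (pvSpaces s.toList 0) (s.toList.length : Int) := by
  simp only [get_space_indices]
  rw [pvA_fold]
  simp only [List.singleton_append]
  rw [PySem.List.foldl_append_singleton_eq_map
    (f := fun i => (PySem.List.pyGetD ((0 : Int) :: pvSpaces s.toList 0 ++ [(s.toList.length : Int)]) i 0,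
                    PySem.List.pyGetD ((0 : Int) :: pvSpaces s.toList 0 ++ [(s.toList.length : Int)]) (i + 1) 0))]
  rw [pvRange_zip _ (by simp)]
  simp only [List.cons_append, List.tail_cons, List.nil_append]
  rw [pvZip_pairs]

lemma pvB_eq (s : String) :
    get_space_indices_alt s = pvPairs 0 (pvSpaces s.toList 0) (s.toList.length : Int) := by
  simp only [get_space_indices_alt]
  exact pvB_fold s.toList 0 0 [] (s.toList.length : Int)

-- ===== VERDICT (by name: the statement is the Claim_ definition above) =====
theorem get_space_indices_spec : Claim_equal_get_space_indices := by
  intro s _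
  unfold Spec_get_space_indices
  rw [pvA_eq, pvB_eq]
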